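-- pv_equiv track=rewrite | github.com/inferne/notes | tensorflow/Recommedation/Recommedation2.py | dict_content_id
-- ===== SOURCE A (Python) =====
-- def dict_content_id(data):
--     dict = {}
--     i = 0
--     for x in data:
--         if x not in dict:
--             dict[x] = i
--             i+=1
--     return dict
-- ===== SOURCE B (Python) =====
-- def dict_content_id(data):
--     # first occurrence position of each key: iterate in reverse so earlier writes win
--     first = {x: i for i, x in reversed(list(enumerate(data)))}
--     # sort the unique keys by first-occurrence position, then rank them
--     order = sorted(first, key=first.get)
--     return {x: i for i, x in enumerate(order)}
-- ===== Notes on version B (the rewrite author's own statement) =====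
-- stated objective: alternative
-- what changed: Replaces A's single-pass membership-test-and-counter loop by a sort-based pipeline: a reverse pass over enumerate(data) records each key's first-occurrence position, the unique keys are sorted by that position, and a final enumerate ranks them.
import Mathlib
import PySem

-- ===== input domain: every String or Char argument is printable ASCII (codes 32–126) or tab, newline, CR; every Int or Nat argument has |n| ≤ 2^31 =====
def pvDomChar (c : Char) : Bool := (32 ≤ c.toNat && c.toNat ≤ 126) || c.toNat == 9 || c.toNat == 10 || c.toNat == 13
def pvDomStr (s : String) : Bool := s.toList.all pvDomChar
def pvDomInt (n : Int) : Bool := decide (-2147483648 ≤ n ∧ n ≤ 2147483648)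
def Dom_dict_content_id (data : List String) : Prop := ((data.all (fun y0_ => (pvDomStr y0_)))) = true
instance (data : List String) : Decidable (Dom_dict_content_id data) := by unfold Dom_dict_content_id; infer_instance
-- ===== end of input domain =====

-- B replaces A's single-pass membership-test-and-counter loop by a sort-based pipeline:
-- a reverse pass records each key's first-occurrence position, sorting by that position
-- yields the unique keys in first-occurrence order, and a final pass ranks them (alternative; same result).

-- ===== PORT A =====
def dict_content_id (data : List String) : List (String × Int) :=
  (data.foldl
    (fun (st : PySem.Dict String Int × Int) x =>
      if !st.1.contains x then (st.1.insert x st.2, st.2 + 1) else st)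
    (PySem.Dict.empty, 0)).1.items

-- ===== PORT B =====
-- first = {x: i for i, x in reversed(list(enumerate(data)))}
def pvFirst (data : List String) : PySem.Dict String Int :=
  (PySem.List.enumerate data 0).reverse.foldl
    (fun (d : PySem.Dict String Int) p => d.insert p.2 p.1) PySem.Dict.empty
-- order = sorted(first, key=first.get)
def pvOrder (data : List String) : List String :=
  PySem.List.sorted (pvFirst data).keys (fun x => (pvFirst data).getD x 0) false
def dict_content_id_alt (data : List String) : List (String × Int) :=
  (PySem.List.enumerate (pvOrder data) 0).map (fun q => (q.2, q.1))

-- ===== PRECONDITION & SPEC =====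
def Spec_dict_content_id (data : List String) (out : List (String × Int)) : Prop := out = dict_content_id_alt data
instance (data : List String) (out : List (String × Int)) : Decidable (Spec_dict_content_id data out) := by unfold Spec_dict_content_id; infer_instance

-- ===== CLAIM (what is proved, stated in full; the proofs are below) =====
def Claim_equal_dict_content_id : Prop := ∀ (data : List String), Dom_dict_content_id data → Spec_dict_content_id data (dict_content_id data)

-- ===== LEMMAS AND PROOFS =====

-- Invariant for A's loop: starting from a dict whose items are the swapped enumeration of its
-- keys and whose counter equals its size, the loop produces the swapped enumeration of
-- Set.update d.keys data.
theorem dict_content_id_loop_inv (data : List String) :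
    ∀ (d : PySem.Dict String Int) (i : Int),
      d.keys.Nodup →
      i = (d.size : Int) →
      d.items = (PySem.List.enumerate d.keys 0).map (fun p => (p.2, p.1)) →
      ((data.foldl
          (fun (st : PySem.Dict String Int × Int) x =>
            if !st.1.contains x then (st.1.insert x st.2, st.2 + 1) else st)
          (d, i)).1).items
        = (PySem.List.enumerate (PySem.Set.update d.keys data) 0).map (fun p => (p.2, p.1)) := by
  induction data with
  | nil => intro d i hnd hi hit; simpa [PySem.Set.update] using hit
  | cons x xs ih =>
    intro d i hnd hi hit
    by_cases hc : d.contains x = true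
    · have hadd : PySem.Set.add d.keys x = d.keys := by
        have hx : x ∈ d.keys := (PySem.Dict.contains_iff_mem_keys d x).mp hc
        simp [PySem.Set.add, PySem.Set.contains, hx]
      simp only [List.foldl_cons, hc, Bool.not_true, Bool.false_eq_true, if_false,
        PySem.Set.update, List.foldl_cons, hadd]
      exact ih d i hnd hi hit
    · have hc' : d.contains x = false := by simpa using hc
      have hkeys : (d.insert x i).keys = d.keys ++ [x] :=
        PySem.Dict.keys_insert_of_not_contains d i hc'
      have hitems : (d.insert x i).items = d.items ++ [(x, i)] :=
        PySem.Dict.items_insert_of_not_contains d i hc'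
      have hlen : (d.keys.length : Int) = i := by
        have : d.size = d.items.length := rfl
        have hk : d.keys.length = d.items.length := by
          simp [PySem.Dict.keys]
        omega
      have hadd : PySem.Set.add d.keys x = d.keys ++ [x] := by
        have hx : x ∉ d.keys := fun hx =>
          by simp [(PySem.Dict.contains_iff_mem_keys d x).mpr hx] at hc'
        simp [PySem.Set.add, PySem.Set.contains, hx]
      simp only [List.foldl_cons, hc', Bool.not_false, if_true, PySem.Set.update, hadd]
      have hnd' : (d.insert x i).keys.Nodup := by
        rw [hkeys]
        refine List.Nodup.append hnd (List.nodup_singleton x) ?_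
        intro a ha hb
        simp at hb; subst hb
        exact absurd ((PySem.Dict.contains_iff_mem_keys d a).mpr ha) (by simp [hc'])
      have hi' : i + 1 = ((d.insert x i).size : Int) := by
        rw [PySem.Dict.size_insert, if_neg (by simp [hc'])]
        omega
      have hit' : (d.insert x i).items
          = (PySem.List.enumerate (d.insert x i).keys 0).map (fun p => (p.2, p.1)) := by
        rw [hitems, hkeys, PySem.List.enumerate_append, List.map_append, hit]
        simp [PySem.List.enumerate, hlen]
      have := ih (d.insert x i) (i + 1) hnd' hi' hit'
      rw [this, hkeys]
      rfl

-- ofList over a cons: the head followed by the dedup of the tail with the head removed.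
theorem pvFoldlAddAcc (xs acc : List String) :
    xs.foldl PySem.Set.add acc = acc ++ (PySem.Set.ofList xs).filter (fun y => decide (y ∉ acc)) := by
  induction xs generalizing acc with
  | nil => simp [PySem.Set.ofList]
  | cons y xs ih =>
    have hof : PySem.Set.ofList (y :: xs) = [y] ++ (PySem.Set.ofList xs).filter (fun z => decide (z ∉ ([y] : List String))) := by
      rw [PySem.Set.ofList_eq_foldl, List.foldl_cons]
      have h0 : PySem.Set.add ([] : List String) y = [y] := by simp [PySem.Set.add, PySem.Set.contains]
      rw [h0, ih]
    by_cases hy : y ∈ acc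
    · have hadd : PySem.Set.add acc y = acc := by
        simp [PySem.Set.add, PySem.Set.contains, hy]
      rw [List.foldl_cons, hadd, ih, hof]
      simp only [List.filter_append, List.filter_filter]
      congr 1
      have h1 : List.filter (fun z => decide (z ∉ acc)) [y] = [] := by simp [hy]
      rw [h1, List.nil_append]
      apply List.filter_congr
      intro z hz
      by_cases hzy : z = y
      · subst hzy; simp [hy]
      · simp [hzy]
    · have hadd : PySem.Set.add acc y = acc ++ [y] := by
        simp [PySem.Set.add, PySem.Set.contains, hy]
      rw [List.foldl_cons, hadd, ih, hof]
      simp only [List.filter_append, List.filter_filter, List.append_assoc]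
      congr 1
      have h1 : List.filter (fun z => decide (z ∉ acc)) [y] = [y] := by simp [hy]
      rw [h1]
      congr 1
      apply List.filter_congr
      intro z hz
      by_cases hzy : z = y
      · subst hzy; simp [hy]
      · simp [hzy]

theorem pvOfListCons (x : String) (xs : List String) :
    PySem.Set.ofList (x :: xs) = x :: (PySem.Set.ofList xs).filter (fun y => decide (y ≠ x)) := by
  rw [PySem.Set.ofList_eq_foldl, List.foldl_cons]
  have h0 : PySem.Set.add ([] : List String) x = [x] := by simp [PySem.Set.add, PySem.Set.contains]
  rw [h0, pvFoldlAddAcc]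
  simp

-- dedup keeps first occurrences in order, so first-occurrence indices increase along it.
theorem pvDedupPairwiseIdxOf (data : List String) :
    (PySem.Set.ofList data).Pairwise (fun a b => data.idxOf a < data.idxOf b) := by
  induction data with
  | nil => simp [PySem.Set.ofList]
  | cons x xs ih =>
    rw [pvOfListCons]
    refine List.pairwise_cons.mpr ⟨?_, ?_⟩
    · intro b hb
      have hbx : b ≠ x := by
        have := (List.mem_filter.mp hb).2
        simpa using this
      rw [List.idxOf_cons_self]
      rw [List.idxOf_cons_ne _ (by simpa using (Ne.symm hbx))]
      omega
    · have h1 := ih.filter (fun y => decide (y ≠ x))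
      refine h1.imp_of_mem ?_
      intro a b ha hb hab
      have hax : a ≠ x := by simpa using (List.mem_filter.mp ha).2
      have hbx : b ≠ x := by simpa using (List.mem_filter.mp hb).2
      rw [List.idxOf_cons_ne _ (by simpa using (Ne.symm hax)),
          List.idxOf_cons_ne _ (by simpa using (Ne.symm hbx))]
      omega

-- The reverse-enumerate insertion loop of B, read back to front: each key maps to its
-- FIRST occurrence position (the last write, coming from the reversed order, wins).
theorem pvFirstGet (xs : List String) (s : Int) (y : String) :
    ((PySem.List.enumerate xs s).foldr (fun p (d : PySem.Dict String Int) => d.insert p.2 p.1) PySem.Dict.empty).get? y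
      = if y ∈ xs then some (s + (xs.idxOf y : Int)) else none := by
  induction xs generalizing s with
  | nil => simp [PySem.List.enumerate_nil, PySem.Dict.get?_empty]
  | cons x xs ih =>
    rw [PySem.List.enumerate_cons, List.foldr_cons]
    rw [PySem.Dict.get?_insert]
    by_cases hyx : y = x
    · subst hyx
      simp [List.idxOf_cons_self]
    · rw [if_neg hyx, ih]
      by_cases hy : y ∈ xs
      · rw [if_pos hy, if_pos (by simp [hy])]
        rw [List.idxOf_cons_ne _ (by simpa using (Ne.symm hyx))]
        push_cast
        congr 1
        omega
      · rw [if_neg hy, if_neg (by simp [hyx, hy])]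

theorem pvFirstNodup (xs : List String) (s : Int) :
    ((PySem.List.enumerate xs s).foldr (fun p (d : PySem.Dict String Int) => d.insert p.2 p.1) PySem.Dict.empty).keys.Nodup := by
  induction xs generalizing s with
  | nil => simp [PySem.List.enumerate_nil, PySem.Dict.empty]
  | cons x xs ih =>
    rw [PySem.List.enumerate_cons, List.foldr_cons]
    exact PySem.Dict.nodup_keys_insert _ _ _ (ih (s + 1))

-- ===== VERDICT (by name: the statement is the Claim_ definition above) =====
theorem dict_content_id_spec : Claim_equal_dict_content_id := by
  intro data _
  unfold Spec_dict_content_id dict_content_id dict_content_id_alt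
  have hA := dict_content_id_loop_inv data PySem.Dict.empty 0 (by simp) (by simp)
    (by simp [PySem.Dict.empty, PySem.List.enumerate_nil])
  rw [hA]
  have hfoldr : pvFirst data = (PySem.List.enumerate data 0).foldr
      (fun p (d : PySem.Dict String Int) => d.insert p.2 p.1) PySem.Dict.empty := by
    rw [pvFirst, List.foldl_reverse]
  have hget : ∀ y, (pvFirst data).get? y = if y ∈ data then some ((data.idxOf y : Int)) else none := by
    intro y
    rw [hfoldr, pvFirstGet]
    simp
  have hnd : (pvFirst data).keys.Nodup := by rw [hfoldr]; exact pvFirstNodup data 0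
  have hmem : ∀ y, y ∈ (pvFirst data).keys ↔ y ∈ data := by
    intro y
    rw [← PySem.Dict.contains_iff_mem_keys]
    rw [PySem.Dict.contains_eq_isSome_get?, hget y]
    by_cases hy : y ∈ data <;> simp [hy]
  have hU : PySem.Set.update (PySem.Dict.empty : PySem.Dict String Int).keys data = PySem.Set.ofList data := by
    simp [PySem.Set.update, PySem.Set.ofList_eq_foldl, PySem.Dict.empty, PySem.Dict.keys]
  rw [hU]
  have hperm : (PySem.Set.ofList data).Perm (pvFirst data).keys := by
    refine (List.perm_ext_iff_of_nodup (PySem.Set.nodup_ofList data) hnd).mpr ?_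
    intro a
    rw [hmem a, PySem.Set.mem_ofList data a]
  have hpair : (PySem.Set.ofList data).Pairwise
      (fun a b => (pvFirst data).getD a 0 < (pvFirst data).getD b 0) := by
    refine (pvDedupPairwiseIdxOf data).imp_of_mem ?_
    intro a b ha hb hab
    have ha' : a ∈ data := (PySem.Set.mem_ofList data a).mp ha
    have hb' : b ∈ data := (PySem.Set.mem_ofList data b).mp hb
    rw [PySem.Dict.getD_eq_get?_getD, PySem.Dict.getD_eq_get?_getD, hget a, hget b,
        if_pos ha', if_pos hb']
    simpa using hab
  have hsort : PySem.List.sorted (pvFirst data).keys (fun x => (pvFirst data).getD x 0) false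
      = PySem.Set.ofList data := PySem.List.sorted_eq_of_perm_of_pairwise_lt _ _ _ hperm hpair
  rw [pvOrder, hsort]
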